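-- pv_equiv track=rewrite | github.com/pearthefruit/competitive-intel-agent | scraper/web_search.py | format_news_for_prompt
-- ===== SOURCE A (Python) =====
-- def format_news_for_prompt(articles, max_chars=2000):
--     """Format news articles into a compact string for LLM context."""
--     if not articles:
--         return ""
--
--     lines = []
--     total = 0
--     for a in articles:
--         title = a.get("title", "")
--         body = a.get("body", "")
--         date = a.get("date", "")
--         source = a.get("source", "")
--
--         line = f"- [{date}] {title}"
--         if source:
--             line += f" ({source})"
--         if body:
--             line += f"\n  {body[:200]}"
--
--         if total + len(line) > max_chars:
--             break
--         lines.append(line)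
--         total += len(line)
--
--     return "\n".join(lines)
-- ===== SOURCE B (Python) =====
-- def format_news_for_prompt(articles, max_chars=2000):
--     """Format news articles into a compact string for LLM context."""
--     def render(a):
--         parts = ["- [", a.get("date", ""), "] ", a.get("title", "")]
--         source = a.get("source", "")
--         if source:
--             parts.extend([" (", source, ")"])
--         body = a.get("body", "")
--         if body:
--             parts.extend(["\n  ", body[:200]])
--         return "".join(parts)
--
--     lines = [render(a) for a in articles]
--     totals, run = [], 0
--     for n in [len(ln) for ln in lines]:
--         run += n
--         totals.append(run)
--     # totals is nondecreasing (line lengths are >= 0), so the lines that fit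
--     # form a prefix: its length is the number of cumulative totals within budget.
--     k = sum(1 for t in totals if t <= max_chars)
--     return "\n".join(lines[:k])
-- ===== Notes on version B (the rewrite author's own statement) =====
-- stated objective: alternative
-- what changed: B renders each article as a join of a parts list (instead of incremental string concatenation), then in separate passes computes prefix sums of line lengths, counts how many cumulative totals fit the budget, and joins that prefix slice - replacing A's single early-exit loop that interleaves formatting with a running total and break.
import Mathlib
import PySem

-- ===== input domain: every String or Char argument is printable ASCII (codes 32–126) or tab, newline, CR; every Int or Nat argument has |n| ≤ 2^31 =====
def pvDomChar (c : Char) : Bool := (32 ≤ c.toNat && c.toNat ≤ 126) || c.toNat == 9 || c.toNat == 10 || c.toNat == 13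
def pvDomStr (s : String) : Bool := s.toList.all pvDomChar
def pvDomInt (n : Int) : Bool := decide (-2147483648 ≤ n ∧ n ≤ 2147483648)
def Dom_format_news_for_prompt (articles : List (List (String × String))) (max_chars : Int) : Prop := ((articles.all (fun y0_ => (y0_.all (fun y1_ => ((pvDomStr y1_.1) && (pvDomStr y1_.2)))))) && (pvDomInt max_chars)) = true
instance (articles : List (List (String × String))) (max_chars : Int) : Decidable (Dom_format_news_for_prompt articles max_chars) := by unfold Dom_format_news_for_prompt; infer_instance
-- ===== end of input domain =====

-- B renders lines as a join of a parts list and selects the fitting prefix by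
-- prefix sums + a count of fitting totals + take, instead of A's early-exit
-- loop with incremental concatenation (objective: alternative decomposition).

-- ===== PORT A =====
-- a.get(k, "") on the association list: first match, default ""
def pvGetA (a : List (String × String)) (k : String) : String := (a.lookup k).getD ""

def pvLineA (a : List (String × String)) : String :=
  let title := pvGetA a "title"
  let body := pvGetA a "body"
  let date := pvGetA a "date"
  let source := pvGetA a "source"
  let line := "- [" ++ date ++ "] " ++ title
  let line := if source ≠ "" then line ++ " (" ++ source ++ ")" else line
  let line := if body ≠ "" then line ++ "\n  " ++ PySem.Str.slice body none (some 200) else line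
  line

-- the for-loop: state (lines, total), break when the next line would overflow
def pvLoopA (max_chars : Int) : List (List (String × String)) → List String → Int → List String
  | [], lines, _ => lines
  | a :: rest, lines, total =>
    let line := pvLineA a
    if total + PySem.Str.len line > max_chars then lines
    else pvLoopA max_chars rest (lines ++ [line]) (total + PySem.Str.len line)

def format_news_for_prompt (articles : List (List (String × String))) (max_chars : Int) : String :=
  if articles = [] then ""
  else PySem.Str.join "\n" (pvLoopA max_chars articles [] 0)

-- ===== PORT B =====
-- render(a): a parts list, extended conditionally, joined with ""
def pvRenderB (a : List (List Char × List Char)) : List Char :=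
  let get := fun (k : List Char) => ((a.lookup k).getD [])
  let parts := [('-' :: ' ' :: ['[']), get "date".toList, (']' :: [' ']), get "title".toList]
  let source := get "source".toList
  let parts := if source ≠ [] then parts ++ [(' ' :: ['(']), source, [')']] else parts
  let body := get "body".toList
  let parts := if body ≠ [] then parts ++ [('\n' :: ' ' :: [' ']), PySem.Chars.slice body none (some 200)] else parts
  PySem.Chars.join [] parts

-- the 'run += n; totals.append(run)' prefix-sum loop
def pvTotalsB (run : Int) : List Int → List Int
  | [] => []
  | n :: ns => (run + n) :: pvTotalsB (run + n) ns

def format_news_for_prompt_alt (articles : List (List (String × String))) (max_chars : Int) : String :=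
  let lines := articles.map (fun a => pvRenderB (a.map (fun p => (p.1.toList, p.2.toList))))
  let totals := pvTotalsB 0 (lines.map (fun l => (l.length : Int)))
  let k := totals.countP (fun t => decide (t ≤ max_chars))
  String.ofList (PySem.Chars.join ['\n'] (lines.take k))

-- ===== PRECONDITION & SPEC =====
def Spec_format_news_for_prompt (articles : List (List (String × String))) (max_chars : Int) (out : String) : Prop := out = format_news_for_prompt_alt articles max_chars
instance (articles : List (List (String × String))) (max_chars : Int) (out : String) : Decidable (Spec_format_news_for_prompt articles max_chars out) := by unfold Spec_format_news_for_prompt; infer_instance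

-- ===== CLAIM (what is proved, stated in full; the proofs are below) =====
def Claim_equal_format_news_for_prompt : Prop := ∀ (articles : List (List (String × String))) (max_chars : Int), Dom_format_news_for_prompt articles max_chars → Spec_format_news_for_prompt articles max_chars (format_news_for_prompt articles max_chars)

-- ===== LEMMAS AND PROOFS =====
theorem pv_lookup_map (a : List (String × String)) (k : String) :
    (a.map (fun p => (p.1.toList, p.2.toList))).lookup k.toList = (a.lookup k).map String.toList := by
  induction a with
  | nil => simp
  | cons p rest ih =>
    by_cases h : k = p.1
    · subst h; simp [List.lookup]
    · have h2 : k.toList ≠ p.1.toList := fun he => h (String.toList_injective he)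
      have b1 : (k.toList == p.1.toList) = false := beq_eq_false_iff_ne.mpr h2
      have b2 : (k == p.1) = false := beq_eq_false_iff_ne.mpr h
      simp [List.lookup, b1, b2, ih]

theorem pvRenderB_eq_lineA (a : List (String × String)) :
    pvRenderB (a.map (fun p => (p.1.toList, p.2.toList))) = (pvLineA a).toList := by
  unfold pvRenderB pvLineA pvGetA
  have hget : ∀ (o : Option String), (o.map String.toList).getD [] = (o.getD "").toList := by
    rintro (_ | _) <;> rfl
  simp only [pv_lookup_map, hget, ne_eq, String.toList_eq_nil_iff]
  split_ifs <;>
    simp [PySem.Chars.join, List.intercalate, List.intersperse, PySem.Str.slice,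
      String.toList_append]

theorem pvTotalsB_mem_le {s t : Int} {ls : List Int} (hls : ∀ x ∈ ls, 0 ≤ x)
    (ht : t ∈ pvTotalsB s ls) : s ≤ t := by
  induction ls generalizing s with
  | nil => simp [pvTotalsB] at ht
  | cons x xs ih =>
    simp only [pvTotalsB, List.mem_cons] at ht
    have hx : 0 ≤ x := hls x (by simp)
    rcases ht with h | h
    · omega
    · have := ih (fun y hy => hls y (by simp [hy])) h
      omega

theorem pvLoopA_eq (mc : Int) (arts : List (List (String × String)))
    (lines : List String) (total : Int) :
    (pvLoopA mc arts lines total).map String.toList =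
      lines.map String.toList ++ ((arts.map (fun a => (pvLineA a).toList)).take
        ((pvTotalsB total ((arts.map (fun a => (pvLineA a).toList)).map (fun l => (l.length : Int)))).countP
          (fun t => decide (t ≤ mc)))) := by
  induction arts generalizing lines total with
  | nil => simp [pvLoopA, pvTotalsB]
  | cons a rest ih =>
    rw [show pvLoopA mc (a :: rest) lines total =
        (if total + PySem.Str.len (pvLineA a) > mc then lines
         else pvLoopA mc rest (lines ++ [pvLineA a]) (total + PySem.Str.len (pvLineA a))) from rfl]
    have hlen : PySem.Str.len (pvLineA a) = ((pvLineA a).toList.length : Int) := PySem.Str.len_eq _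
    by_cases h : total + PySem.Str.len (pvLineA a) > mc
    · rw [if_pos h]
      have hd : (decide (total + ((pvLineA a).toList.length : Int) ≤ mc)) = false := by
        simp only [decide_eq_false_iff_not]; omega
      have hrest : (pvTotalsB (total + ((pvLineA a).toList.length : Int))
          ((rest.map (fun a => (pvLineA a).toList)).map (fun l => (l.length : Int)))).countP
          (fun t => decide (t ≤ mc)) = 0 := by
        rw [List.countP_eq_zero]
        intro t ht
        have := pvTotalsB_mem_le (s := total + ((pvLineA a).toList.length : Int)) (t := t)
          (by intro x hx; simp only [List.mem_map] at hx; obtain ⟨l, _, rfl⟩ := hx; positivity) ht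
        simp only [decide_eq_true_eq]; omega
      simp only [List.map_cons, pvTotalsB, List.countP_cons, hd, hrest]
      simp
    · rw [if_neg h]
      have hd : (decide (total + ((pvLineA a).toList.length : Int) ≤ mc)) = true := by
        simp only [decide_eq_true_eq]; omega
      rw [ih]
      simp only [List.map_cons, pvTotalsB, List.countP_cons, hd, hlen, List.map_append,
        List.map_cons, List.map_nil]
      simp [List.take_succ_cons, List.append_assoc]

-- ===== VERDICT (by name: the statement is the Claim_ definition above) =====
theorem format_news_for_prompt_spec : Claim_equal_format_news_for_prompt := by
  intro articles max_chars _
  unfold Spec_format_news_for_prompt format_news_for_prompt format_news_for_prompt_alt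
  simp only [pvRenderB_eq_lineA]
  by_cases h : articles = []
  · subst h
    simp [pvTotalsB, PySem.Chars.join, List.intercalate]
  · simp only [h, if_false]
    apply String.toList_injective
    have hmap : (PySem.Str.join "\n" (pvLoopA max_chars articles [] 0)).toList =
        PySem.Chars.join "\n".toList ((pvLoopA max_chars articles [] 0).map String.toList) := by
      simp [PySem.Str.join]
    rw [hmap, pvLoopA_eq]
    simp [String.toList_ofList, Function.comp_def, List.map_map]
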